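-- pv_equiv track=rewrite | github.com/yukayokogawa/masters-thesis | decoding_strategy/strategy_utils.py | tag_kp_tokens_in_paragraph
-- ===== SOURCE A (Python) =====
-- def tag_kp_tokens_in_paragraph(tokens, kp_set):
--     """Find tokens that belong to any KP from kp_set"""
--
--     kp_tag = [0 for _ in tokens]
--     first_token_to_kp = dict()
--     for kp in kp_set:
--         if len(kp) == 0: continue
--         first = kp[0]
--         if not first in first_token_to_kp:
--             first_token_to_kp[first] = []
--         first_token_to_kp[first].append(kp)
--
--     ix = 0
--     kp_start_idx = []
--
--     while ix < len(tokens):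
--         cur_tok = tokens[ix]
--         if not cur_tok in first_token_to_kp:
--             ix += 1
--             continue
--
--         # find the longest matched sequence of tokens
--         possible_kps = first_token_to_kp[cur_tok]
--         longest_match = []
--         for p in possible_kps:
--             if len(p) + ix >= len(tokens):
--                 p = p[:len(tokens) - ix]
--             if tokens[ix: len(p) + ix] == p \
--                 and len(p) > len(longest_match):
--                 longest_match = p
--
--         if len(longest_match) > 0:
--             kp_tag[ix: ix + len(longest_match)] = [1] * len(longest_match)
--             kp_start_idx.append(ix)
--             ix += len(longest_match)
--
--         else:
--             ix += 1
--     return kp_tag, kp_start_idx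
-- ===== SOURCE B (Python) =====
-- def tag_kp_tokens_in_paragraph(tokens, kp_set):
--     """Find tokens that belong to any KP from kp_set"""
--     # Precompute the set of all non-empty KP prefixes and the set of full KPs;
--     # at each position walk the growing prefix once (longest match, with the
--     # same end-of-paragraph truncation rule as the original).
--     prefixes = set()
--     ends = set()
--     for kp in kp_set:
--         t = tuple(kp)
--         if not t:
--             continue
--         ends.add(t)
--         for l in range(len(t)):
--             prefixes.add(t[:l + 1])
--
--     n = len(tokens)
--     kp_tag = [0] * n
--     kp_start_idx = []
--     ix = 0
--     while ix < n:
--         best = 0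
--         l = 1
--         while ix + l <= n and tuple(tokens[ix:ix + l]) in prefixes:
--             if tuple(tokens[ix:ix + l]) in ends or ix + l == n:
--                 best = l
--             l += 1
--         if best > 0:
--             kp_tag[ix:ix + best] = [1] * best
--             kp_start_idx.append(ix)
--             ix += best
--         else:
--             ix += 1
--     return kp_tag, kp_start_idx
-- ===== Notes on version B (the rewrite author's own statement) =====
-- stated objective: alternative
-- what changed: Replaces the per-position scan over all key phrases sharing the first token with a precomputed set of all KP prefixes plus a set of full KPs, so each position does a single incremental longest-prefix walk (same end-of-paragraph truncation rule); per-position cost depends on the matched prefix length instead of the number of candidate key phrases.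
import Mathlib
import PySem

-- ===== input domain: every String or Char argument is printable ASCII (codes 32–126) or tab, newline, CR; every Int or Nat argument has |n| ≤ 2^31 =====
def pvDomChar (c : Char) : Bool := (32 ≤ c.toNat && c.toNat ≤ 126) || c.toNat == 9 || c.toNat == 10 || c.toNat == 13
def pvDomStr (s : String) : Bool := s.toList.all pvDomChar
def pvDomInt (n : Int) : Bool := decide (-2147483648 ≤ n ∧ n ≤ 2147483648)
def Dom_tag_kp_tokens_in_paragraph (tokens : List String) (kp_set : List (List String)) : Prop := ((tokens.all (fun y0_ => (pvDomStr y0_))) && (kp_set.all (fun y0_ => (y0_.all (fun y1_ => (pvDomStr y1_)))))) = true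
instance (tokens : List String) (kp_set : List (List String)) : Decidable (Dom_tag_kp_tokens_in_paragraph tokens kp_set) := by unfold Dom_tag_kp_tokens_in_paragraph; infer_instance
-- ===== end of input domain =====

-- B replaces the per-position scan over all candidate key phrases with a precomputed
-- prefix set walked once per position (an alternative algorithm with the same output).


-- ===== PORT A =====
-- first_token_to_kp build loop: d[first] = d.get(first, []) + [kp]  (Dict.modify is exactly that)
def tagA_build (kp_set : List (List String)) : PySem.Dict String (List (List String)) :=
  kp_set.foldl (fun d kp =>
    match kp with
    | [] => d
    | first :: _ => d.modify first [] (· ++ [kp])) PySem.Dict.empty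

-- the `for p in possible_kps` fold computing longest_match; all slice bounds are
-- nonnegative and in range here, so tokens[ix:len(p)+ix] is (tokens.drop ix).take |p|
def tagA_longest (tokens : List String) (ix : Nat) (possible : List (List String)) : List String :=
  possible.foldl (fun lm p =>
    let p' := if tokens.length ≤ p.length + ix then p.take (tokens.length - ix) else p
    if (tokens.drop ix).take p'.length = p' ∧ lm.length < p'.length then p' else lm) []

-- the main while loop; kp_tag[ix:ix+L] = [1]*L is the take/replicate/drop splice
-- (first argument = fuel, an upper bound on the remaining iterations; ix advances by
-- at least 1 per step, so the fuel supplied at the call site is never exhausted)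
def tagA_loop (tokens : List String) (m : PySem.Dict String (List (List String))) :
    Nat → Nat → List Int → List Int → List Int × List Int
  | 0, _, tag, starts => (tag, starts)
  | fuel + 1, ix, tag, starts =>
    if ix < tokens.length then
      let cur := tokens.getD ix ""
      match m.get? cur with
      | none => tagA_loop tokens m fuel (ix + 1) tag starts
      | some possible =>
        let lm := tagA_longest tokens ix possible
        if 0 < lm.length then
          tagA_loop tokens m fuel (ix + lm.length)
            (tag.take ix ++ List.replicate lm.length (1 : Int) ++ tag.drop (ix + lm.length))
            (starts ++ [(ix : Int)])
        else tagA_loop tokens m fuel (ix + 1) tag starts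
    else (tag, starts)

def tag_kp_tokens_in_paragraph (tokens : List String) (kp_set : List (List String)) : List Int × List Int :=
  tagA_loop tokens (tagA_build kp_set) (tokens.length + 1) 0 (List.replicate tokens.length (0 : Int)) []

-- ===== PORT B =====
-- build (prefixes, ends): for each non-empty kp, add kp to ends and all kp[:l+1] to prefixes
def tagB_build (kp_set : List (List String)) : PySem.Set (List String) × PySem.Set (List String) :=
  kp_set.foldl (fun pe kp =>
    match kp with
    | [] => pe
    | _ :: _ => ((List.range kp.length).foldl (fun s l => PySem.Set.add s (kp.take (l + 1))) pe.1,
          PySem.Set.add pe.2 kp)) (PySem.Set.empty, PySem.Set.empty)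

-- inner while: grow l while tokens[ix:ix+l] is a KP prefix, recording match lengths
-- (first Nat argument = fuel, an upper bound on the remaining iterations)
def tagB_walk (prefixes ends : PySem.Set (List String)) (tokens : List String) (ix : Nat) :
    Nat → Nat → Nat → Nat
  | 0, _, best => best
  | fuel + 1, l, best =>
    if ix + l ≤ tokens.length ∧ (tokens.drop ix).take l ∈ prefixes then
      tagB_walk prefixes ends tokens ix fuel (l + 1)
        (if (tokens.drop ix).take l ∈ ends ∨ ix + l = tokens.length then l else best)
    else best

def tagB_loop (prefixes ends : PySem.Set (List String)) (tokens : List String) :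
    Nat → Nat → List Int → List Int → List Int × List Int
  | 0, _, tag, starts => (tag, starts)
  | fuel + 1, ix, tag, starts =>
    if ix < tokens.length then
      let best := tagB_walk prefixes ends tokens ix (tokens.length + 1) 1 0
      if 0 < best then
        tagB_loop prefixes ends tokens fuel (ix + best)
          (tag.take ix ++ List.replicate best (1 : Int) ++ tag.drop (ix + best))
          (starts ++ [(ix : Int)])
      else tagB_loop prefixes ends tokens fuel (ix + 1) tag starts
    else (tag, starts)

def tag_kp_tokens_in_paragraph_alt (tokens : List String) (kp_set : List (List String)) : List Int × List Int :=
  let pe := tagB_build kp_set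
  tagB_loop pe.1 pe.2 tokens (tokens.length + 1) 0 (List.replicate tokens.length (0 : Int)) []

-- ===== PRECONDITION & SPEC =====
def Spec_tag_kp_tokens_in_paragraph (tokens : List String) (kp_set : List (List String)) (out : List Int × List Int) : Prop := out = tag_kp_tokens_in_paragraph_alt tokens kp_set
instance (tokens : List String) (kp_set : List (List String)) (out : List Int × List Int) : Decidable (Spec_tag_kp_tokens_in_paragraph tokens kp_set out) := by unfold Spec_tag_kp_tokens_in_paragraph; infer_instance

-- ===== CLAIM (what is proved, stated in full; the proofs are below) =====
def Claim_equal_tag_kp_tokens_in_paragraph : Prop := ∀ (tokens : List String) (kp_set : List (List String)), Dom_tag_kp_tokens_in_paragraph tokens kp_set → Spec_tag_kp_tokens_in_paragraph tokens kp_set (tag_kp_tokens_in_paragraph tokens kp_set)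

-- ===== LEMMAS AND PROOFS =====

-- the length a single kp contributes at position ix (0 if it does not match)
def mlen (tokens : List String) (ix : Nat) (kp : List String) : Nat :=
  if (tokens.drop ix).take (min kp.length (tokens.length - ix)) = kp.take (min kp.length (tokens.length - ix))
  then min kp.length (tokens.length - ix) else 0

-- the intended longest-match length at ix: max of mlen over all key phrases
def bestLen (tokens : List String) (kp_set : List (List String)) (ix : Nat) : Nat :=
  kp_set.foldl (fun a kp => max a (mlen tokens ix kp)) 0

theorem mlen_le (tokens : List String) (ix : Nat) (kp : List String) :
    mlen tokens ix kp ≤ tokens.length - ix := by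
  unfold mlen; split <;> omega

theorem mlen_match {tokens : List String} {ix : Nat} {kp : List String}
    (h : 0 < mlen tokens ix kp) :
    (tokens.drop ix).take (mlen tokens ix kp) = kp.take (mlen tokens ix kp) ∧
      mlen tokens ix kp = min kp.length (tokens.length - ix) := by
  by_cases hm : (tokens.drop ix).take (min kp.length (tokens.length - ix))
      = kp.take (min kp.length (tokens.length - ix))
  · unfold mlen
    rw [if_pos hm]
    exact ⟨hm, rfl⟩
  · unfold mlen at h
    rw [if_neg hm] at h
    omega

-- ---- A side ----

theorem tagA_longest_len (tokens : List String) (ix : Nat) (possible : List (List String)) :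
    (tagA_longest tokens ix possible).length =
      possible.foldl (fun a kp => max a (mlen tokens ix kp)) 0 := by
  unfold tagA_longest
  suffices h : ∀ (ps : List (List String)) (lm : List String),
      (ps.foldl (fun lm p =>
        let p' := if tokens.length ≤ p.length + ix then p.take (tokens.length - ix) else p
        if (tokens.drop ix).take p'.length = p' ∧ lm.length < p'.length then p' else lm) lm).length
      = ps.foldl (fun a kp => max a (mlen tokens ix kp)) lm.length by
    simpa using h possible []
  intro ps
  induction ps with
  | nil => intro lm; rfl
  | cons p ps ih =>
    intro lm
    simp only [List.foldl_cons]
    rw [ih]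
    congr 1
    show (let p' := if tokens.length ≤ p.length + ix then p.take (tokens.length - ix) else p
      if (tokens.drop ix).take p'.length = p' ∧ lm.length < p'.length then p' else lm).length
      = max lm.length (mlen tokens ix p)
    have hp' : (if tokens.length ≤ p.length + ix then p.take (tokens.length - ix) else p)
        = p.take (min p.length (tokens.length - ix)) := by
      by_cases hc : tokens.length ≤ p.length + ix
      · have hmin : min p.length (tokens.length - ix) = tokens.length - ix := by omega
        rw [hmin]; simp [hc]
      · have hmin : min p.length (tokens.length - ix) = p.length := by omega
        rw [hmin]; simp [hc]
    simp only [hp', List.length_take]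
    rw [Nat.min_comm (min p.length (tokens.length - ix)) p.length]
    have hmm : min p.length (min p.length (tokens.length - ix)) = min p.length (tokens.length - ix) := by omega
    rw [hmm]
    unfold mlen
    by_cases hmatch : (tokens.drop ix).take (min p.length (tokens.length - ix)) = p.take (min p.length (tokens.length - ix))
    · simp only [hmatch, if_true, true_and]
      split <;> simp [List.length_take] <;> omega
    · simp only [hmatch, false_and, if_false]
      omega

theorem tagA_build_getD (kp_set : List (List String)) (c : String) :
    (tagA_build kp_set).getD c [] = kp_set.filter (fun kp => kp.head? = some c) := by
  unfold tagA_build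
  suffices h : ∀ (l : List (List String)) (d : PySem.Dict String (List (List String))),
      (l.foldl (fun d kp => match kp with
        | [] => d
        | first :: _ => d.modify first [] (· ++ [kp])) d).getD c []
      = d.getD c [] ++ l.filter (fun kp => kp.head? = some c) by
    simpa using h kp_set PySem.Dict.empty
  intro l
  induction l with
  | nil => intro d; simp
  | cons kp l ih =>
    intro d
    match kp with
    | [] => simpa using ih d
    | first :: rest =>
      simp only [List.foldl_cons]
      rw [ih]
      rw [PySem.Dict.getD_modify]
      by_cases hfc : c = first
      · subst hfc; simp
      · have : (first :: rest).head? = some c ↔ False := by simp [Ne.symm hfc]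
        simp [hfc, Ne.symm hfc]

-- a kp whose first token is not tokens[ix] contributes 0 (ix < length)
theorem mlen_eq_zero_of_head_ne {tokens : List String} {ix : Nat} (hix : ix < tokens.length)
    {kp : List String} (h : kp.head? ≠ some (tokens.getD ix "")) :
    mlen tokens ix kp = 0 := by
  unfold mlen
  split
  · rename_i hm
    match kp with
    | [] => simp
    | a :: rest =>
      exfalso
      have hne : min (a :: rest).length (tokens.length - ix) ≠ 0 := by
        simp only [List.length_cons]; omega
      have h0 : ((tokens.drop ix).take (min (a :: rest).length (tokens.length - ix))).head? =
          ((a :: rest).take (min (a :: rest).length (tokens.length - ix))).head? := by rw [hm]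
      rw [List.head?_take, List.head?_take, if_neg hne, if_neg hne] at h0
      have hd : (tokens.drop ix).head? = some (tokens.getD ix "") := by
        rw [List.head?_drop]
        simp [List.getD_eq_getElem?_getD, List.getElem?_eq_getElem hix]
      rw [hd] at h0
      exact h (by simpa using h0.symm)
  · rfl

theorem foldl_max_filter (tokens : List String) (ix : Nat) (hix : ix < tokens.length)
    (l : List (List String)) (c : String) (hc : c = tokens.getD ix "") :
    (l.filter (fun kp => kp.head? = some c)).foldl (fun a kp => max a (mlen tokens ix kp)) 0
      = l.foldl (fun a kp => max a (mlen tokens ix kp)) 0 := by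
  subst hc
  suffices h : ∀ (a : Nat), (l.filter (fun kp => kp.head? = some (tokens.getD ix ""))).foldl
      (fun a kp => max a (mlen tokens ix kp)) a = l.foldl (fun a kp => max a (mlen tokens ix kp)) a by
    exact h 0
  induction l with
  | nil => intro a; rfl
  | cons kp l ih =>
    intro a
    rw [List.filter_cons]
    by_cases hk : kp.head? = some (tokens.getD ix "")
    · rw [if_pos (by simpa using hk)]
      simp only [List.foldl_cons]
      exact ih _
    · rw [if_neg (by simpa using hk)]
      simp only [List.foldl_cons]
      rw [mlen_eq_zero_of_head_ne hix hk, Nat.max_zero]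
      exact ih a

-- ---- B side: membership in the built sets ----

theorem mem_foldl_add {α : Type} [BEq α] [LawfulBEq α] (g : Nat → α) (l : List Nat)
    (s : PySem.Set α) (x : α) :
    (x ∈ l.foldl (fun s a => PySem.Set.add s (g a)) s) ↔ x ∈ s ∨ ∃ a ∈ l, x = g a := by
  induction l generalizing s with
  | nil => simp
  | cons b l ih =>
    simp only [List.foldl_cons, ih, PySem.Set.mem_add]
    constructor
    · rintro (⟨h | h⟩ | h)
      · exact Or.inl h
      · exact Or.inr ⟨b, by simp, h⟩
      · rcases h with ⟨a, ha, rfl⟩; exact Or.inr ⟨a, by simp [ha], rfl⟩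
    · rintro (h | ⟨a, ha, rfl⟩)
      · exact Or.inl (Or.inl h)
      · rcases List.mem_cons.mp ha with rfl | ha
        · exact Or.inl (Or.inr rfl)
        · exact Or.inr ⟨a, ha, rfl⟩

theorem tagB_build_mem (kp_set : List (List String)) (x : List String) :
    (x ∈ (tagB_build kp_set).1 ↔ ∃ kp ∈ kp_set, ∃ j < kp.length, x = kp.take (j + 1)) ∧
    (x ∈ (tagB_build kp_set).2 ↔ x ∈ kp_set ∧ x ≠ []) := by
  unfold tagB_build
  suffices h : ∀ (l : List (List String)) (pe : PySem.Set (List String) × PySem.Set (List String)),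
      (x ∈ (l.foldl (fun pe kp =>
        match kp with
        | [] => pe
        | _ :: _ => ((List.range kp.length).foldl (fun s l => PySem.Set.add s (kp.take (l + 1))) pe.1,
              PySem.Set.add pe.2 kp)) pe).1 ↔ x ∈ pe.1 ∨ ∃ kp ∈ l, ∃ j < kp.length, x = kp.take (j + 1)) ∧
      (x ∈ (l.foldl (fun pe kp =>
        match kp with
        | [] => pe
        | _ :: _ => ((List.range kp.length).foldl (fun s l => PySem.Set.add s (kp.take (l + 1))) pe.1,
              PySem.Set.add pe.2 kp)) pe).2 ↔ x ∈ pe.2 ∨ (x ∈ l ∧ x ≠ [])) by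
    have := h kp_set (PySem.Set.empty, PySem.Set.empty)
    simpa [PySem.Set.empty] using this
  intro l
  induction l with
  | nil => intro pe; simp
  | cons kp l ih =>
    intro pe
    match kp with
    | [] =>
      simp only [List.foldl_cons]
      constructor
      · rw [(ih pe).1]; simp
      · rw [(ih pe).2]
        constructor
        · rintro (h | h)
          · exact Or.inl h
          · exact Or.inr ⟨by simp [h.1], h.2⟩
        · rintro (h | ⟨hm, hne⟩)
          · exact Or.inl h
          · rcases List.mem_cons.mp hm with rfl | hm
            · exact absurd rfl hne
            · exact Or.inr ⟨hm, hne⟩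
    | a :: rest =>
      simp only [List.foldl_cons]
      constructor
      · rw [(ih _).1]
        simp only [mem_foldl_add]
        constructor
        · rintro (⟨h | ⟨j, hj, rfl⟩⟩ | ⟨kp', h1, h2⟩)
          · exact Or.inl h
          · exact Or.inr ⟨a :: rest, by simp, j, by simpa using hj, rfl⟩
          · exact Or.inr ⟨kp', by simp [h1], h2⟩
        · rintro (h | ⟨kp', hm, j, hj, rfl⟩)
          · exact Or.inl (Or.inl h)
          · rcases List.mem_cons.mp hm with rfl | hm
            · exact Or.inl (Or.inr ⟨j, by simpa using hj, rfl⟩)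
            · exact Or.inr ⟨kp', hm, j, hj, rfl⟩
      · rw [(ih _).2]
        simp only [PySem.Set.mem_add]
        constructor
        · rintro (⟨h | rfl⟩ | ⟨h1, h2⟩)
          · exact Or.inl h
          · exact Or.inr ⟨by simp, by simp⟩
          · exact Or.inr ⟨by simp [h1], h2⟩
        · rintro (h | ⟨hm, hne⟩)
          · exact Or.inl (Or.inl h)
          · rcases List.mem_cons.mp hm with rfl | hm
            · exact Or.inl (Or.inr rfl)
            · exact Or.inr ⟨hm, hne⟩

-- ---- generic Nat-max fold helpers ----

theorem foldl_max_acc {α : Type} (f : α → Nat) (l : List α) :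
    ∀ a : Nat, l.foldl (fun a x => max a (f x)) a = max a (l.foldl (fun a x => max a (f x)) 0) := by
  induction l with
  | nil => intro a; simp
  | cons x l ih =>
    intro a
    simp only [List.foldl_cons]
    rw [ih (max a (f x)), ih (max 0 (f x))]
    omega

theorem foldl_max_eq_zero {α : Type} {f : α → Nat} {l : List α}
    (h : ∀ x ∈ l, f x = 0) : l.foldl (fun a x => max a (f x)) 0 = 0 := by
  induction l with
  | nil => rfl
  | cons x l ih =>
    simp only [List.foldl_cons]
    rw [foldl_max_acc]
    rw [ih (fun y hy => h y (List.mem_cons_of_mem _ hy)), h x (by simp)]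
    omega

theorem foldl_max_split {α : Type} (f g : α → Nat) (l : List α) :
    l.foldl (fun a x => max a (max (f x) (g x))) 0
      = max (l.foldl (fun a x => max a (f x)) 0) (l.foldl (fun a x => max a (g x)) 0) := by
  induction l with
  | nil => rfl
  | cons x l ih =>
    simp only [List.foldl_cons]
    rw [foldl_max_acc (fun y => max (f y) (g y)) l (max 0 (max (f x) (g x))),
        foldl_max_acc f l (max 0 (f x)), foldl_max_acc g l (max 0 (g x)), ih]
    omega

theorem foldl_max_indicator {α : Type} (Q : α → Prop) [DecidablePred Q] (c : Nat) (l : List α) :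
    l.foldl (fun a x => max a (if Q x then c else 0)) 0
      = if ∃ x ∈ l, Q x then c else 0 := by
  induction l with
  | nil => simp
  | cons x l ih =>
    simp only [List.foldl_cons]
    rw [foldl_max_acc _ l, ih]
    by_cases hx : Q x <;> by_cases hl : ∃ y ∈ l, Q y <;>
      simp [hx, hl]

theorem foldl_max_congr {α : Type} {f g : α → Nat} (l : List α)
    (h : ∀ x ∈ l, f x = g x) :
    l.foldl (fun a x => max a (f x)) 0 = l.foldl (fun a x => max a (g x)) 0 := by
  induction l with
  | nil => rfl
  | cons x l ih =>
    simp only [List.foldl_cons]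
    rw [foldl_max_acc f l (max 0 (f x)), foldl_max_acc g l (max 0 (g x)), h x (by simp),
        ih (fun y hy => h y (List.mem_cons_of_mem _ hy))]

-- ---- B side: the walk computes the max match length ----

-- the maximum mlen among matches of length at least l
def bestGe (tokens : List String) (kp_set : List (List String)) (ix l : Nat) : Nat :=
  kp_set.foldl (fun a kp => max a (if l ≤ mlen tokens ix kp then mlen tokens ix kp else 0)) 0

theorem bestGe_one (tokens : List String) (kp_set : List (List String)) (ix : Nat) :
    bestGe tokens kp_set ix 1 = bestLen tokens kp_set ix := by
  unfold bestGe bestLen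
  exact foldl_max_congr _ (fun kp _ => by split <;> omega)

-- a positive mlen ≥ l puts tokens[ix:ix+l] into the prefix set
theorem seg_mem_prefixes {tokens : List String} {kp_set : List (List String)} {ix l : Nat}
    (hl : 1 ≤ l) {kp : List String} (hkp : kp ∈ kp_set) (hm : l ≤ mlen tokens ix kp) :
    ix + l ≤ tokens.length ∧ (tokens.drop ix).take l ∈ (tagB_build kp_set).1 := by
  have h0 : 0 < mlen tokens ix kp := by omega
  obtain ⟨hmatch, hmin⟩ := mlen_match h0
  have hle : mlen tokens ix kp ≤ tokens.length - ix := mlen_le tokens ix kp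
  refine ⟨by omega, ?_⟩
  rw [(tagB_build_mem kp_set _).1]
  refine ⟨kp, hkp, l - 1, by omega, ?_⟩
  have hsub : l - 1 + 1 = l := by omega
  rw [hsub]
  have := congrArg (List.take l) hmatch
  rwa [List.take_take, List.take_take, Nat.min_eq_left hm] at this

-- if the walk's continue-condition fails, no match of length ≥ l remains
theorem bestGe_eq_zero {tokens : List String} {kp_set : List (List String)} {ix l : Nat}
    (hl : 1 ≤ l)
    (hcond : ¬ (ix + l ≤ tokens.length ∧ (tokens.drop ix).take l ∈ (tagB_build kp_set).1)) :
    bestGe tokens kp_set ix l = 0 := by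
  unfold bestGe
  apply foldl_max_eq_zero
  intro kp hkp
  by_cases hm : l ≤ mlen tokens ix kp
  · exact absurd (seg_mem_prefixes hl hkp hm) hcond
  · simp [hm]

-- under the continue-condition, an exact match of length l is the same as the
-- end-set / end-of-paragraph test of the walk
theorem exists_mlen_eq_iff {tokens : List String} {kp_set : List (List String)} {ix l : Nat}
    (hl : 1 ≤ l) (hn : ix + l ≤ tokens.length)
    (hpre : (tokens.drop ix).take l ∈ (tagB_build kp_set).1) :
    (∃ kp ∈ kp_set, mlen tokens ix kp = l) ↔
      ((tokens.drop ix).take l ∈ (tagB_build kp_set).2 ∨ ix + l = tokens.length) := by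
  have hseglen : ((tokens.drop ix).take l).length = l := by
    rw [List.length_take, List.length_drop]; omega
  constructor
  · rintro ⟨kp, hkp, hm⟩
    obtain ⟨hmatch, hmin⟩ := mlen_match (tokens := tokens) (ix := ix) (kp := kp) (by omega)
    rw [hm] at hmatch hmin
    by_cases hlen : kp.length = l
    · left
      rw [(tagB_build_mem kp_set _).2]
      have : (tokens.drop ix).take l = kp := by
        rw [hmatch, List.take_of_length_le (by omega)]
      rw [this]
      refine ⟨hkp, fun hcon => ?_⟩
      rw [hcon] at hlen
      simp at hlen
      omega
    · right
      omega
  · rintro (hE | hend)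
    · rw [(tagB_build_mem kp_set _).2] at hE
      refine ⟨(tokens.drop ix).take l, hE.1, ?_⟩
      unfold mlen
      rw [hseglen]
      have hminl : min l (tokens.length - ix) = l := by omega
      rw [hminl, List.take_take, Nat.min_self]
      simp
    · rw [(tagB_build_mem kp_set _).1] at hpre
      obtain ⟨kp, hkp, j, hj, hx⟩ := hpre
      have hxlen : l = min (j + 1) kp.length := by
        have := congrArg List.length hx
        simpa [hseglen] using this
      have hjl : l = j + 1 := by omega
      refine ⟨kp, hkp, ?_⟩
      unfold mlen
      have hminl : min kp.length (tokens.length - ix) = l := by omega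
      rw [hminl]
      have hkpl : kp.take l = (tokens.drop ix).take l := by
        rw [hx, hjl]
      simp [hkpl]

-- one unfolding of bestGe: split off the exact-length-l matches
theorem bestGe_succ {tokens : List String} {kp_set : List (List String)} {ix l : Nat}
    (hl : 1 ≤ l) (hn : ix + l ≤ tokens.length)
    (hpre : (tokens.drop ix).take l ∈ (tagB_build kp_set).1) :
    bestGe tokens kp_set ix l =
      max (if (tokens.drop ix).take l ∈ (tagB_build kp_set).2 ∨ ix + l = tokens.length then l else 0)
        (bestGe tokens kp_set ix (l + 1)) := by
  unfold bestGe
  have hpt : ∀ kp ∈ kp_set,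
      (if l ≤ mlen tokens ix kp then mlen tokens ix kp else 0)
        = max (if mlen tokens ix kp = l then l else 0)
            (if l + 1 ≤ mlen tokens ix kp then mlen tokens ix kp else 0) := by
    intro kp _
    split <;> split <;> split <;> omega
  rw [foldl_max_congr kp_set hpt, foldl_max_split, foldl_max_indicator]
  rw [if_congr (exists_mlen_eq_iff hl hn hpre) rfl rfl]

theorem tagB_walk_spec (tokens : List String) (kp_set : List (List String)) (ix : Nat) :
    ∀ (d l best : Nat), tokens.length + 1 ≤ ix + l + d → 1 ≤ l → best ≤ l →
      tagB_walk (tagB_build kp_set).1 (tagB_build kp_set).2 tokens ix d l best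
        = max best (bestGe tokens kp_set ix l) := by
  intro d
  induction d with
  | zero =>
    intro l best hd hl hb
    rw [tagB_walk]
    rw [bestGe_eq_zero hl (by omega)]
    omega
  | succ d ih =>
    intro l best hd hl hb
    rw [tagB_walk]
    by_cases hc : ix + l ≤ tokens.length ∧ (tokens.drop ix).take l ∈ (tagB_build kp_set).1
    · rw [if_pos hc]
      rw [ih (l + 1) _ (by omega) (by omega) (by split <;> omega)]
      rw [bestGe_succ hl hc.1 hc.2]
      split <;> omega
    · rw [if_neg hc]
      rw [bestGe_eq_zero hl hc]
      omega

-- ---- A side: the candidate fold computes the same max ----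

theorem tagA_len_spec {tokens : List String} (kp_set : List (List String)) {ix : Nat}
    (hix : ix < tokens.length) {possible : List (List String)}
    (hq : (tagA_build kp_set).get? (tokens.getD ix "") = some possible) :
    (tagA_longest tokens ix possible).length = bestLen tokens kp_set ix := by
  have hgd : (tagA_build kp_set).getD (tokens.getD ix "") [] = possible :=
    PySem.Dict.getD_of_get?_eq_some _ _ hq
  rw [tagA_longest_len, ← hgd, tagA_build_getD]
  exact foldl_max_filter tokens ix hix kp_set _ rfl

theorem tagA_none_spec {tokens : List String} (kp_set : List (List String)) {ix : Nat}
    (hix : ix < tokens.length)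
    (hq : (tagA_build kp_set).get? (tokens.getD ix "") = none) :
    bestLen tokens kp_set ix = 0 := by
  have hgd : (tagA_build kp_set).getD (tokens.getD ix "") [] = [] :=
    PySem.Dict.getD_of_get?_eq_none _ _ hq
  unfold bestLen
  rw [← foldl_max_filter tokens ix hix kp_set _ rfl, ← tagA_build_getD, hgd]
  rfl

-- ---- the two main loops agree ----

theorem loops_eq (tokens : List String) (kp_set : List (List String)) :
    ∀ (d ix : Nat) (tag starts : List Int),
      tagA_loop tokens (tagA_build kp_set) d ix tag starts
        = tagB_loop (tagB_build kp_set).1 (tagB_build kp_set).2 tokens d ix tag starts := by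
  intro d
  induction d with
  | zero =>
    intro ix tag starts
    rw [tagA_loop, tagB_loop]
  | succ d ih =>
    intro ix tag starts
    by_cases hix : ix < tokens.length
    · have hwalk : tagB_walk (tagB_build kp_set).1 (tagB_build kp_set).2 tokens ix
            (tokens.length + 1) 1 0 = bestLen tokens kp_set ix := by
        rw [tagB_walk_spec tokens kp_set ix (tokens.length + 1) 1 0 (by omega) (by omega) (by omega),
            bestGe_one]
        omega
      rw [tagA_loop, tagB_loop, if_pos hix, if_pos hix]
      cases hq : (tagA_build kp_set).get? (tokens.getD ix "") with
      | none =>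
        have h0 : bestLen tokens kp_set ix = 0 := tagA_none_spec kp_set hix hq
        have hB0 : ¬ 0 < tagB_walk (tagB_build kp_set).1 (tagB_build kp_set).2 tokens ix
            (tokens.length + 1) 1 0 := by
          rw [hwalk]; omega
        simp only [hq]
        rw [if_neg hB0]
        exact ih (ix + 1) tag starts
      | some possible =>
        have hlen : (tagA_longest tokens ix possible).length = bestLen tokens kp_set ix :=
          tagA_len_spec kp_set hix hq
        simp only [hq]
        by_cases hpos : 0 < bestLen tokens kp_set ix
        · have hA : 0 < (tagA_longest tokens ix possible).length := by rw [hlen]; exact hpos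
          have hB : 0 < tagB_walk (tagB_build kp_set).1 (tagB_build kp_set).2 tokens ix
              (tokens.length + 1) 1 0 := by
            rw [hwalk]; exact hpos
          rw [if_pos hA, if_pos hB, hlen, hwalk]
          exact ih _ _ _
        · have hA : ¬ 0 < (tagA_longest tokens ix possible).length := by rw [hlen]; exact hpos
          have hB : ¬ 0 < tagB_walk (tagB_build kp_set).1 (tagB_build kp_set).2 tokens ix
              (tokens.length + 1) 1 0 := by
            rw [hwalk]; exact hpos
          rw [if_neg hA, if_neg hB]
          exact ih (ix + 1) tag starts
    · rw [tagA_loop, tagB_loop, if_neg hix, if_neg hix]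

-- ===== VERDICT (by name: the statement is the Claim_ definition above) =====
theorem tag_kp_tokens_in_paragraph_spec : Claim_equal_tag_kp_tokens_in_paragraph := by
  intro tokens kp_set _
  unfold Spec_tag_kp_tokens_in_paragraph tag_kp_tokens_in_paragraph tag_kp_tokens_in_paragraph_alt
  exact loops_eq tokens kp_set (tokens.length + 1) 0 _ _
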